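-- pv_equiv track=rewrite | github.com/rlr-smu/camarl | Hierarchical_MTM/data.py | getFailVessel
-- ===== SOURCE A (Python) =====
-- def getFailVessel(tmpSuccVessel, HORIZON):
--     totalHorizon = HORIZON
--     tmpSuccVessel.append(0)
--     tmpPop = sum(tmpSuccVessel)
--     tmpFailVessel = [0]
--     for tt in range(1, totalHorizon + 1):
--         tmpFail = tmpPop - sum(tmpSuccVessel[1:tt+1])
--         tmpFailVessel.append(tmpFail)
--     return tmpSuccVessel, tmpFailVessel
-- ===== SOURCE B (Python) =====
-- def getFailVessel(tmpSuccVessel, HORIZON):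
--     # Running difference instead of re-summing the slice each step (O(H) vs O(H^2)).
--     tmpSuccVessel.append(0)
--     total = sum(tmpSuccVessel)
--     tmpFailVessel = [0]
--     running = total
--     for tt in range(1, HORIZON + 1):
--         running -= tmpSuccVessel[tt] if tt < len(tmpSuccVessel) else 0
--         tmpFailVessel.append(running)
--     return tmpSuccVessel, tmpFailVessel
-- ===== Notes on version B (the rewrite author's own statement) =====
-- stated objective: faster
-- what changed: B keeps a running remainder and subtracts one element per step instead of re-summing the growing slice tmpSuccVessel[1:tt+1] at every iteration.
import Mathlib
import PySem

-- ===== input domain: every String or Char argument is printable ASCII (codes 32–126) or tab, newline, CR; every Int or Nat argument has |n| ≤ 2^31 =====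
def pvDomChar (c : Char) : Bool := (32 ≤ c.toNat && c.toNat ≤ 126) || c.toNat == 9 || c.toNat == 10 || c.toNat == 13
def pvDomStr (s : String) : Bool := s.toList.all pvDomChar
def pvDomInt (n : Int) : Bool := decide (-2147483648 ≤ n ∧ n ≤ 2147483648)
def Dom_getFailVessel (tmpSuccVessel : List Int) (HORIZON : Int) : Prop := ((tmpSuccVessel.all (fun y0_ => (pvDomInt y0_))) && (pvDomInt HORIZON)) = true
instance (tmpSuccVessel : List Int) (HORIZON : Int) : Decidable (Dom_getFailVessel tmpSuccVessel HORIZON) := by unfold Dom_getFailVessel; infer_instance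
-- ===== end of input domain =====

-- B replaces the per-step re-summation of the slice tmpSuccVessel[1:tt+1] by a running remainder
-- (objective: faster). Both versions append 0 to the argument list in Python; equivalence here is
-- about the returned pair (which contains that extended list).

-- ===== PORT A =====
def getFailVessel (tmpSuccVessel : List Int) (HORIZON : Int) : List Int × List Int :=
  let xs := tmpSuccVessel ++ [0]
  let tmpPop := xs.sum
  let tmpFailVessel := (PySem.List.pyRange 1 (HORIZON + 1) 1).foldl
    (fun acc tt => acc ++ [tmpPop - (PySem.List.slice xs (some 1) (some (tt + 1))).sum]) [0]
  (xs, tmpFailVessel)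

-- ===== PORT B =====
def getFailVessel_alt (tmpSuccVessel : List Int) (HORIZON : Int) : List Int × List Int :=
  let xs := tmpSuccVessel ++ [0]
  let total := xs.sum
  let st := (PySem.List.pyRange 1 (HORIZON + 1) 1).foldl
    (fun (st : Int × List Int) tt =>
      let running := st.1 - (if tt < (xs.length : Int) then PySem.List.pyGetD xs tt 0 else 0)
      (running, st.2 ++ [running])) (total, [0])
  (xs, st.2)

-- ===== PRECONDITION & SPEC =====
def Spec_getFailVessel (tmpSuccVessel : List Int) (HORIZON : Int) (out : List Int × List Int) : Prop := out = getFailVessel_alt tmpSuccVessel HORIZON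
instance (tmpSuccVessel : List Int) (HORIZON : Int) (out : List Int × List Int) : Decidable (Spec_getFailVessel tmpSuccVessel HORIZON out) := by unfold Spec_getFailVessel; infer_instance

-- ===== CLAIM (what is proved, stated in full; the proofs are below) =====
def Claim_equal_getFailVessel : Prop := ∀ (tmpSuccVessel : List Int) (HORIZON : Int), Dom_getFailVessel tmpSuccVessel HORIZON → Spec_getFailVessel tmpSuccVessel HORIZON (getFailVessel tmpSuccVessel HORIZON)

-- ===== LEMMAS AND PROOFS =====

-- Invariant of the two folds over range(1, 1+n): B's running value equals total minus the
-- slice sum A would compute, and the accumulated lists coincide.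
theorem pvFold_inv (xs : List Int) (n : Nat) :
    ((PySem.List.pyRange 1 (1 + (n : Int)) 1).foldl
        (fun (st : Int × List Int) tt =>
          let running := st.1 - (if tt < (xs.length : Int) then PySem.List.pyGetD xs tt 0 else 0)
          (running, st.2 ++ [running])) (xs.sum, [0]))
      = (xs.sum - (PySem.List.slice xs (some 1) (some ((n : Int) + 1))).sum,
         (PySem.List.pyRange 1 (1 + (n : Int)) 1).foldl
           (fun acc tt => acc ++ [xs.sum - (PySem.List.slice xs (some 1) (some (tt + 1))).sum]) [0]) := by
  induction n with
  | zero =>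
      rw [show PySem.List.pyRange 1 (1 + ((0:Nat):Int)) 1 = [] from
            PySem.List.pyRange_one_eq_nil (by simp)]
      rw [show (((0:Nat):Int) + 1) = (1:Int) by simp]
      rw [PySem.List.slice_toNat xs (a := 1) (b := 1) (by norm_num) (by norm_num)]
      simp
  | succ m ih =>
      have hsplit : PySem.List.pyRange 1 (1 + ((m + 1 : Nat) : Int)) 1
          = PySem.List.pyRange 1 (1 + (m : Int)) 1 ++ [1 + (m : Int)] := by
        push_cast
        rw [show (1 : Int) + ((m : Int) + 1) = (1 + (m : Int)) + 1 by ring]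
        exact PySem.List.pyRange_one_succ_right (by omega)
      rw [hsplit, List.foldl_append, List.foldl_append, ih]
      simp only [List.foldl_cons, List.foldl_nil]
      have h1 : ((m : Int) + 1) = ((m + 1 : Nat) : Int) := by push_cast; ring
      have h2 : (((m + 1 : Nat) : Int) + 1) = ((m + 2 : Nat) : Int) := by push_cast; ring
      have hkey : xs.sum - (PySem.List.slice xs (some 1) (some ((m : Int) + 1))).sum -
          (if 1 + (m : Int) < (xs.length : Int) then PySem.List.pyGetD xs (1 + (m : Int)) 0 else 0)
          = xs.sum - (PySem.List.slice xs (some 1) (some (((m + 1 : Nat) : Int) + 1))).sum := by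
        rw [h1, h2,
            PySem.List.slice_toNat xs (a := 1) (b := ((m + 1 : Nat) : Int)) (by norm_num)
              (by exact_mod_cast Nat.zero_le _),
            PySem.List.slice_toNat xs (a := 1) (b := ((m + 2 : Nat) : Int)) (by norm_num)
              (by exact_mod_cast Nat.zero_le _)]
        simp only [Int.toNat_natCast, Int.toNat_one]
        have htake : (xs.drop 1).take (m + 2 - 1)
            = (xs.drop 1).take (m + 1 - 1) ++ ((xs.drop 1)[m]?).toList := by
          simpa using List.take_add_one (l := xs.drop 1) (i := m)
        rw [htake, List.sum_append]
        by_cases hr : 1 + (m : Int) < (xs.length : Int)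
        · have hm : m < (xs.drop 1).length := by simp; omega
          have hget : (xs.drop 1)[m]? = some ((xs.drop 1)[m]) := List.getElem?_eq_getElem hm
          rw [if_pos hr, PySem.List.pyGetD_of_nonneg xs 0 (by omega : (0:Int) ≤ 1 + (m:Int))]
          rw [show (1 + (m : Int)).toNat = 1 + m by omega]
          have hx : xs.getD (1 + m) 0 = (xs.drop 1)[m] := by
            rw [List.getD_eq_getElem _ _ (by omega : 1 + m < xs.length)]
            simp [Nat.add_comm]
          rw [hx, hget]
          simp; ring
        · have hget : (xs.drop 1)[m]? = none :=
            List.getElem?_eq_none (by simp; omega)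
          rw [if_neg hr, hget]
          simp
      rw [Prod.mk.injEq]
      refine ⟨hkey, ?_⟩
      have harg : xs.sum - (PySem.List.slice xs (some 1) (some (1 + (m : Int) + 1))).sum
          = xs.sum - (PySem.List.slice xs (some 1) (some (((m + 1 : Nat) : Int) + 1))).sum := by
        rw [show (1 + (m : Int) + 1) = (((m + 1 : Nat) : Int) + 1) by push_cast; ring]
      rw [harg, ← hkey]

-- ===== VERDICT (by name: the statement is the Claim_ definition above) =====
theorem getFailVessel_spec : Claim_equal_getFailVessel := by
  intro xs H _
  unfold Spec_getFailVessel getFailVessel getFailVessel_alt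
  dsimp only
  by_cases h : H + 1 ≤ 1
  · simp [PySem.List.pyRange_one_eq_nil h]
  · rw [show H + 1 = 1 + ((H.toNat : Nat) : Int) by omega, pvFold_inv]
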